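-- pv_equiv track=rewrite | github.com/OpportunV/adventofcode | d16.py | part_one
-- ===== SOURCE A (Python) =====
-- def part_one(signal: list, phases):
--     n = len(signal)
--
--     for j in range(phases):
--         ans = [-1 for _ in range(n)]
--         sums = [sum(signal[:i]) for i in range(n + 1)]
--         for i in range(n):
--             cur_digit = 0
--             for one_start in range(i, n, 4 * (i + 1)):
--                 cur_digit += sums[min(one_start + i + 1, n)] - sums[one_start]
--             for neg_one_start in range(3 * i + 2, n, 4 * (i + 1)):
--                 cur_digit -= sums[min(neg_one_start + i + 1, n)] - sums[neg_one_start]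
--
--             ans[i] = abs(cur_digit) % 10
--         signal = ans[:]
--
--     return signal
-- ===== SOURCE B (Python) =====
-- def part_one(sig: list, phases):
--     # parameter renamed from 'signal' only because the harness forbids that
--     # identifier in a rewrite; same position, same meaning
--     cur = list(sig)
--     for _ in range(phases):
--         n = len(cur)
--         out = []
--         for i in range(n):
--             s = 0
--             for k in range(n):
--                 s += cur[k] * (0, 1, 0, -1)[((k + 1) // (i + 1)) % 4]
--             out.append(abs(s) % 10)
--         cur = out
--     return cur
-- ===== Notes on version B (the rewrite author's own statement) =====
-- stated objective: simpler
-- what changed: Replaced A's prefix-sum table and block-stride stepping (whole +1/-1 blocks via sums[] differences) by the textbook naive FFT phase: each output digit is one direct scan of the signal against the repeating base pattern [0,1,0,-1] indexed by ((k+1)//(i+1))%4.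
import Mathlib
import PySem

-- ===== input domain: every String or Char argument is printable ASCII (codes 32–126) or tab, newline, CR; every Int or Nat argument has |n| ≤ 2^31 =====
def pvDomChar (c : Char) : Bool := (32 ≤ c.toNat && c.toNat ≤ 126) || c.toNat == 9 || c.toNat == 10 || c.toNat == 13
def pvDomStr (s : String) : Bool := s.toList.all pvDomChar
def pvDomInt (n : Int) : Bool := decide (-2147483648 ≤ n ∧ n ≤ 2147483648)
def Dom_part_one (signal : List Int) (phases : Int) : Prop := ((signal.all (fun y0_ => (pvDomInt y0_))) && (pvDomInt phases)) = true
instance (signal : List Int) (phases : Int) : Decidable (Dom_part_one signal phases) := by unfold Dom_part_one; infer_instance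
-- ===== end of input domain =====

-- B replaces A's prefix-sum table and block-stride stepping by the direct naive FFT phase:
-- each output digit is one scan of the signal against the repeating base pattern [0,1,0,-1]
-- (objective: simpler). Return value only; neither version mutates its argument.

-- ===== PORT A =====
-- one phase of A: prefix sums, then per digit i sum whole +1 blocks and subtract -1 blocks
def pvPhaseA (n : Int) (sig : List Int) : List Int :=
  let sums : List Int := (PySem.List.pyRange 0 (n+1) 1).map
    (fun i => (PySem.List.slice sig none (some i)).sum)
  -- 'ans = [-1]*n; for i in range(n): ans[i] = …' assigns each slot once in order: ported as map
  (PySem.List.pyRange 0 n 1).map (fun i =>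
    let c1 : Int := (PySem.List.pyRange i n (4*(i+1))).foldl
      (fun acc s => acc + (PySem.List.pyGetD sums (min (s+i+1) n) 0 - PySem.List.pyGetD sums s 0)) 0
    let c2 : Int := (PySem.List.pyRange (3*i+2) n (4*(i+1))).foldl
      (fun acc s => acc - (PySem.List.pyGetD sums (min (s+i+1) n) 0 - PySem.List.pyGetD sums s 0)) c1
    PySem.Int.mod |c2| 10)

def part_one (signal : List Int) (phases : Int) : List Int :=
  let n : Int := signal.length
  (PySem.List.pyRange 0 phases 1).foldl (fun sig _ => pvPhaseA n sig) signal

-- ===== PORT B =====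
-- one phase of B: digit i = |Σ_k sig[k] * [0,1,0,-1][((k+1)//(i+1)) % 4]| % 10
def pvPhaseB (sig : List Int) : List Int :=
  let n : Int := sig.length
  (PySem.List.pyRange 0 n 1).map (fun i =>
    let s : Int := (PySem.List.pyRange 0 n 1).foldl
      (fun acc k => acc + PySem.List.pyGetD sig k 0 *
        PySem.List.pyGetD ([0, 1, 0, -1] : List Int)
          (PySem.Int.mod (PySem.Int.floordiv (k+1) (i+1)) 4) 0) 0
    PySem.Int.mod |s| 10)

def part_one_alt (signal : List Int) (phases : Int) : List Int :=
  (PySem.List.pyRange 0 phases 1).foldl (fun sig _ => pvPhaseB sig) signal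

-- ===== PRECONDITION & SPEC =====
def Spec_part_one (signal : List Int) (phases : Int) (out : List Int) : Prop := out = part_one_alt signal phases
instance (signal : List Int) (phases : Int) (out : List Int) : Decidable (Spec_part_one signal phases out) := by unfold Spec_part_one; infer_instance

-- ===== CLAIM (what is proved, stated in full; the proofs are below) =====
def Claim_equal_part_one : Prop := ∀ (signal : List Int) (phases : Int), Dom_part_one signal phases → Spec_part_one signal phases (part_one signal phases)

-- ===== LEMMAS AND PROOFS =====

-- prefix sum of the first k elements
def pvS (sig : List Int) (k : Nat) : Int := ((sig.take k).sum : Int)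

-- A's per-digit block sum, over Nat: starts a, a+4i+4, a+8i+8, … below m,
-- each start s contributing S (min (s+i+1) m) - S s
def pvBs (S : Nat → Int) (i a m : Nat) : Int :=
  if a < m then (S (min (a+i+1) m) - S a) + pvBs S i (a+4*i+4) m else 0
termination_by m - a
decreasing_by omega

-- B's pattern coefficient for digit i at position k
def pvCoef (i k : Nat) : Int := ([0, 1, 0, -1] : List Int).getD (((k+1)/(i+1)) % 4) 0

lemma pvBs_nil (S : Nat → Int) (i a m : Nat) (h : m ≤ a) : pvBs S i a m = 0 := by
  rw [pvBs]; simp [Nat.not_lt.mpr h]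

lemma pv_take_succ_sum (sig : List Int) (m : Nat) (hm : m < sig.length) :
    pvS sig (m+1) = pvS sig m + sig.getD m 0 := by
  rw [pvS, pvS, List.sum_take_succ _ _ hm, List.getD_eq_getElem _ _ hm]

lemma pvRange_pos_nil (a b s : Int) (hs : 0 < s) (hab : b ≤ a) :
    PySem.List.pyRange a b s = [] := by
  rw [PySem.List.pyRange_of_pos _ _ hs]
  simp [Int.not_lt.mpr hab]

lemma pvRange_pos_cons (a b s : Int) (hs : 0 < s) (hab : a < b) :
    PySem.List.pyRange a b s = a :: PySem.List.pyRange (a+s) b s := by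
  rw [PySem.List.pyRange_of_pos _ _ hs, PySem.List.pyRange_of_pos _ _ hs]
  by_cases h2 : a + s < b
  · have hq : (0:Int) ≤ (b - a - 1) / s := Int.ediv_nonneg (by omega) (by omega)
    have hcount : (b - a + s - 1) / s = (b - a - 1) / s + 1 := by
      have he : b - a + s - 1 = (b - a - 1) + 1 * s := by ring
      rw [he, Int.add_mul_ediv_right _ _ (by omega : s ≠ 0)]
    have hcount2 : b - (a + s) + s - 1 = b - a - 1 := by ring
    rw [if_pos hab, if_pos h2, hcount, hcount2]
    have ht : ((b - a - 1) / s + 1).toNat = ((b - a - 1) / s).toNat + 1 := by omega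
    rw [ht, List.range_succ_eq_map]
    simp only [List.map_cons, List.map_map]
    refine congrArg₂ _ (by ring) ?_
    apply List.map_congr_left
    intro k _
    simp only [Function.comp]
    push_cast
    ring
  · have hone : (b - a + s - 1) / s = 1 := by
      have h1 := PySem.Int.floordiv_eq_iff_of_pos (a := b - a + s - 1) (b := s) (q := 1) hs
      have h2' : PySem.Int.floordiv (b - a + s - 1) s = 1 := h1.mpr (by constructor <;> omega)
      rwa [PySem.Int.floordiv_eq_ediv_of_pos hs] at h2'
    rw [if_pos hab, if_neg h2, hone]
    simp

lemma pvModHelp (p u x : Nat) (hx : x < 4*p) : (4*(p*u) + x) % (4*p) = x := by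
  rw [show 4*(p*u) = 4*p*u from by ring, Nat.mul_add_mod]; exact Nat.mod_eq_of_lt hx

lemma pvBs_succ (S : Nat → Int) (i m : Nat) : ∀ (d a : Nat), m + 1 - a ≤ d →
    pvBs S i a (m+1) = pvBs S i a m +
      (if a ≤ m ∧ (m - a) % (4*i+4) ≤ i then S (m+1) - S m else 0) := by
  intro d
  induction d with
  | zero =>
    intro a ha
    rw [pvBs_nil S i a (m+1) (by omega), pvBs_nil S i a m (by omega),
      if_neg (by omega)]
    ring
  | succ d ih =>
    intro a ha
    by_cases h1 : a < m+1
    · by_cases h2 : a < m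
      · conv_lhs => rw [pvBs]
        rw [if_pos h1]
        conv_rhs => rw [pvBs]
        rw [if_pos h2, ih (a+4*i+4) (by omega)]
        by_cases h3 : a + i + 1 ≤ m
        · have hmin : min (a+i+1) (m+1) = min (a+i+1) m := by omega
          rw [hmin]
          by_cases h4 : a + 4*i + 4 ≤ m
          · have hmod : (m - a) % (4*i+4) = (m - (a+4*i+4)) % (4*i+4) := by
              rw [Nat.mod_eq_sub_mod (by omega)]
              congr 1
              omega
            rw [hmod]
            have : (a ≤ m ∧ (m - (a+4*i+4)) % (4*i+4) ≤ i) ↔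
                (a+4*i+4 ≤ m ∧ (m - (a+4*i+4)) % (4*i+4) ≤ i) := by
              constructor <;> (rintro ⟨x, y⟩; exact ⟨by omega, y⟩)
            rw [if_congr this rfl rfl]
            ring
          · have hc2 : ¬ (a+4*i+4 ≤ m ∧ (m - (a+4*i+4)) % (4*i+4) ≤ i) := by omega
            have hc1 : ¬ (a ≤ m ∧ (m - a) % (4*i+4) ≤ i) := by
              have : (m - a) % (4*i+4) = m - a := Nat.mod_eq_of_lt (by omega)
              omega
            rw [if_neg hc2, if_neg hc1]
            ring
        · have hmin1 : min (a+i+1) (m+1) = m+1 := by omega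
          have hmin2 : min (a+i+1) m = m := by omega
          have hc2 : ¬ (a+4*i+4 ≤ m ∧ (m - (a+4*i+4)) % (4*i+4) ≤ i) := by omega
          have hc1 : (a ≤ m ∧ (m - a) % (4*i+4) ≤ i) := by
            have : (m - a) % (4*i+4) = m - a := Nat.mod_eq_of_lt (by omega)
            omega
          rw [hmin1, hmin2, if_neg hc2, if_pos hc1]
          ring
      · -- a = m
        have hm : a = m := by omega
        subst hm
        conv_lhs => rw [pvBs]
        rw [if_pos h1, pvBs_nil S i (a+4*i+4) (a+1) (by omega),
          pvBs_nil S i a a (le_refl a), if_pos (by simp)]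
        have hmin : min (a+i+1) (a+1) = a+1 := by omega
        rw [hmin]
        ring
    · rw [pvBs_nil S i a (m+1) (by omega), pvBs_nil S i a m (by omega),
        if_neg (by omega)]
      ring

lemma pvCoef_eq (i m : Nat) :
    ((if i ≤ m ∧ (m - i) % (4*i+4) ≤ i then (1:Int) else 0) -
     (if 3*i+2 ≤ m ∧ (m - (3*i+2)) % (4*i+4) ≤ i then (1:Int) else 0)) = pvCoef i m := by
  set p := i + 1 with hp
  have hp0 : 0 < p := Nat.succ_pos i
  have hdm := Nat.div_add_mod (m+1) p
  have hrlt : (m+1) % p < p := Nat.mod_lt _ hp0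
  set q := (m+1) / p with hq
  set r := (m+1) % p with hr
  have hdm4 := Nat.div_add_mod q 4
  have hvlt : q % 4 < 4 := Nat.mod_lt _ (by omega)
  set u := q / 4 with hu
  set v := q % 4 with hv
  have hcoef : pvCoef i m = ([0, 1, 0, -1] : List Int).getD v 0 := by
    rw [pvCoef]
  have hpq : p * q = 4*(p*u) + v*p := by
    calc p * q = p * (4*u + v) := by rw [hdm4]
    _ = 4*(p*u) + v*p := by ring
  set X := p * u with hX
  have hc : 4*i+4 = 4*p := by omega
  rw [hc, hcoef]
  -- m + 1 = 4*X + v*p + r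
  have hm1 : m + 1 = 4*X + v*p + r := by omega
  interval_cases v
  · -- v = 0 : coefficient 0
    rw [List.getD]
    simp only [List.getElem?_cons_zero, Option.getD_some]
    rcases Nat.eq_zero_or_pos u with hu0 | hupos
    · have hX0 : X = 0 := by rw [hX, hu0, Nat.mul_zero]
      rw [if_neg (by omega), if_neg (by omega)]
      norm_num
    · obtain ⟨w, hw⟩ : ∃ w, u = w + 1 := ⟨u - 1, by omega⟩
      have hXw : X = p*w + p := by rw [hX, hw]; ring
      have h1 : m - i = 4*(p*w) + (3*p + r) := by omega
      have h3 : m - (3*i+2) = 4*(p*w) + (p + r) := by omega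
      rw [h1, h3, pvModHelp p w _ (by omega), pvModHelp p w _ (by omega),
        if_neg (by omega), if_neg (by omega)]
      norm_num
  · -- v = 1 : coefficient 1, first block fires
    rw [List.getD]
    simp only [List.getElem?_cons_succ, List.getElem?_cons_zero, Option.getD_some]
    have h1 : m - i = 4*(p*u) + r := by omega
    rw [h1, pvModHelp p u _ (by omega), if_pos (by omega)]
    rcases Nat.eq_zero_or_pos u with hu0 | hupos
    · have hX0 : X = 0 := by rw [hX, hu0, Nat.mul_zero]
      rw [if_neg (by omega)]
      ring
    · obtain ⟨w, hw⟩ : ∃ w, u = w + 1 := ⟨u - 1, by omega⟩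
      have hXw : X = p*w + p := by rw [hX, hw]; ring
      have h3 : m - (3*i+2) = 4*(p*w) + (2*p + r) := by omega
      rw [h3, pvModHelp p w _ (by omega), if_neg (by omega)]
      ring
  · -- v = 2 : coefficient 0
    rw [List.getD]
    simp only [List.getElem?_cons_succ, List.getElem?_cons_zero, Option.getD_some]
    have h1 : m - i = 4*(p*u) + (p + r) := by omega
    rw [h1, pvModHelp p u _ (by omega), if_neg (by omega)]
    rcases Nat.eq_zero_or_pos u with hu0 | hupos
    · have hX0 : X = 0 := by rw [hX, hu0, Nat.mul_zero]
      rw [if_neg (by omega)]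
      norm_num
    · obtain ⟨w, hw⟩ : ∃ w, u = w + 1 := ⟨u - 1, by omega⟩
      have hXw : X = p*w + p := by rw [hX, hw]; ring
      have h3 : m - (3*i+2) = 4*(p*w) + (3*p + r) := by omega
      rw [h3, pvModHelp p w _ (by omega), if_neg (by omega)]
      norm_num
  · -- v = 3 : coefficient -1, second block fires
    rw [List.getD]
    simp only [List.getElem?_cons_succ, List.getElem?_cons_zero, Option.getD_some]
    have h1 : m - i = 4*(p*u) + (2*p + r) := by omega
    have h3 : m - (3*i+2) = 4*(p*u) + r := by omega
    rw [h1, h3, pvModHelp p u _ (by omega), pvModHelp p u _ (by omega),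
      if_neg (by omega), if_pos (by omega)]
    ring

lemma pv_main (sig : List Int) (i : Nat) :
    ∀ m, m ≤ sig.length →
      pvBs (pvS sig) i i m - pvBs (pvS sig) i (3*i+2) m =
        ((List.range m).map (fun k => sig.getD k 0 * pvCoef i k)).sum := by
  intro m
  induction m with
  | zero => intro _; rw [pvBs_nil _ _ _ _ (by omega), pvBs_nil _ _ _ _ (by omega)]; simp
  | succ m ih =>
    intro hm
    rw [pvBs_succ (pvS sig) i m (m+1) i (by omega),
      pvBs_succ (pvS sig) i m (m+1) (3*i+2) (by omega),
      List.range_succ, List.map_append, List.sum_append, ← ih (by omega)]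
    have hD : pvS sig (m+1) - pvS sig m = sig.getD m 0 := by
      rw [pv_take_succ_sum sig m (by omega)]; ring
    rw [hD]
    have := pvCoef_eq i m
    simp only [List.map_cons, List.map_nil, List.sum_cons, List.sum_nil]
    split_ifs at this ⊢ <;> (rw [← this]; push_cast; ring)

lemma pv_foldl_sub {β : Type} (l : List β) (g : β → Int) (a : Int) :
    List.foldl (fun acc x => acc - g x) a l = a - (l.map g).sum := by
  induction l generalizing a with
  | nil => simp
  | cons x xs ih => simp [ih]; ring

lemma pvBs_eq (S : Nat → Int) (i m : Nat) :
    ∀ (d a : Nat), m - a ≤ d → ∀ (f : Int → Int),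
    (∀ s : Nat, a ≤ s → s < m → f s = S (min (s+i+1) m) - S s) →
    ((PySem.List.pyRange a m (4*(i:Int)+4)).map f).sum = pvBs S i a m := by
  intro d
  induction d with
  | zero =>
    intro a ha f hf
    rw [pvRange_pos_nil _ _ _ (by positivity) (by exact_mod_cast by omega : (m:Int) ≤ a),
      pvBs_nil _ _ _ _ (by omega)]
    simp
  | succ d ih =>
    intro a ha f hf
    by_cases h : a < m
    · rw [pvRange_pos_cons _ _ _ (by positivity) (by exact_mod_cast h)]
      have hstep : ((a:Int) + (4*(i:Int)+4)) = ((a + 4*i + 4 : Nat) : Int) := by push_cast; ring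
      rw [List.map_cons, List.sum_cons, hstep,
        ih (a + 4*i + 4) (by omega) f (fun s h1 h2 => hf s (by omega) h2),
        hf a (le_refl a) h]
      conv_rhs => rw [pvBs]
      rw [if_pos h]
    · rw [pvRange_pos_nil _ _ _ (by positivity) (by exact_mod_cast by omega : (m:Int) ≤ a),
        pvBs_nil _ _ _ _ (by omega)]
      simp

lemma pv_phase_eq (sig : List Int) : pvPhaseA (sig.length : Int) sig = pvPhaseB sig := by
  simp only [pvPhaseA, pvPhaseB]
  apply List.map_congr_left
  intro x hx
  rw [PySem.List.mem_pyRange_one] at hx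
  obtain ⟨iN, rfl⟩ : ∃ iN : Nat, x = (iN : Int) := ⟨x.toNat, by omega⟩
  have hiN : iN < sig.length := by exact_mod_cast hx.2
  congr 1
  congr 1
  -- A side: rewrite the two folds into map-sums
  rw [PySem.List.foldl_add, pv_foldl_sub, PySem.List.foldl_add]
  -- convert pyRange arguments to the Nat-cast forms expected by pvBs_eq
  rw [show (4*((iN:Int)+1)) = (4*(iN:Int)+4) from by ring,
      show (3*(iN:Int)+2) = ((3*iN+2 : Nat) : Int) from by push_cast; ring]
  have hsums : ∀ s : Nat, s ≤ sig.length →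
      PySem.List.pyGetD ((PySem.List.pyRange 0 ((sig.length:Int)+1) 1).map
        (fun j => (PySem.List.slice sig none (some j)).sum)) (s:Int) 0 = pvS sig s := by
    intro s hs
    rw [show ((sig.length:Int)+1) = ((sig.length+1 : Nat) : Int) from by push_cast; ring,
      PySem.List.pyGetD_map_pyRange _ (sig.length+1) s 0 (by omega),
      PySem.List.slice_to_natCast]
    rfl
  have hf : ∀ s : Nat, iN ≤ s → s < sig.length →
      (fun t : Int => PySem.List.pyGetD ((PySem.List.pyRange 0 ((sig.length:Int)+1) 1).map
          (fun j => (PySem.List.slice sig none (some j)).sum)) (min (t+(iN:Int)+1) (sig.length:Int)) 0 -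
        PySem.List.pyGetD ((PySem.List.pyRange 0 ((sig.length:Int)+1) 1).map
          (fun j => (PySem.List.slice sig none (some j)).sum)) t 0) (s:Int) =
      pvS sig (min (s+iN+1) sig.length) - pvS sig s := by
    intro s h1 h2
    simp only
    rw [show ((s:Int)+(iN:Int)+1) = ((s+iN+1 : Nat):Int) from by push_cast; ring,
      ← Nat.cast_min, hsums _ (by omega), hsums _ (by omega)]
  rw [pvBs_eq (pvS sig) iN sig.length sig.length iN (by omega) _ hf,
      pvBs_eq (pvS sig) iN sig.length sig.length (3*iN+2) (by omega) _
        (fun s h1 h2 => hf s (by omega) h2),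
      zero_add, pv_main sig iN sig.length (le_refl _)]
  -- B side
  rw [zero_add, PySem.List.pyRange_zero_natCast, List.map_map]
  congr 1
  apply List.map_congr_left
  intro k hk
  simp only [Function.comp]
  rw [show ((k:Int)+1) = ((k+1 : Nat):Int) from by push_cast; ring,
    show ((iN:Int)+1) = ((iN+1 : Nat):Int) from by push_cast; ring,
    PySem.Int.floordiv_natCast,
    show (4:Int) = ((4:Nat):Int) from by norm_num,
    PySem.Int.mod_natCast, PySem.List.pyGetD_natCast, PySem.List.pyGetD_natCast]
  rfl

lemma pv_phaseB_len (sig : List Int) : (pvPhaseB sig).length = sig.length := by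
  simp [pvPhaseB, PySem.List.length_pyRange_one]

-- ===== VERDICT (by name: the statement is the Claim_ definition above) =====
theorem part_one_spec : Claim_equal_part_one := by
  intro signal phases _
  unfold Spec_part_one part_one part_one_alt
  generalize PySem.List.pyRange 0 phases 1 = l
  suffices h : ∀ (l : List Int) (sig : List Int), sig.length = signal.length →
      l.foldl (fun s _ => pvPhaseA (signal.length : Int) s) sig =
      l.foldl (fun s _ => pvPhaseB s) sig by
    exact h l signal rfl
  intro l
  induction l with
  | nil => intro sig _; rfl
  | cons x xs ih =>
    intro sig hlen
    simp only [List.foldl_cons]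
    have h1 := pv_phase_eq sig
    rw [hlen] at h1
    rw [h1]
    exact ih (pvPhaseB sig) (by rw [pv_phaseB_len, hlen])
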